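-- pv_equiv track=rewrite | github.com/dennougorilla/vmt.vim | src/fmt.py | vim_align
-- ===== SOURCE A (Python) =====
-- def vim_align(shiftwidth,lines):
--     word_lst=[]
--     for i in lines:
--         word_lst.append(i.split())
--
--     max_element=0
--     for i in word_lst:
--         if(len(i)>max_element):
--             max_element=len(i)
--
--     max_word=[]
--     for i in range(max_element):
--         max_word.append(0)
--
--     for i in range(len(word_lst)):
--         num_element=len(word_lst[i])
--         for j in range(num_element):
--             if(len(word_lst[i][j])>max_word[j]):
--                 max_word[j]=len(word_lst[i][j])
--
--     for i in range(len(word_lst)):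
--         num_element=len(word_lst[i])
--         for j in range(num_element):
--             for k in range(max_word[j]-len(word_lst[i][j])+shiftwidth):
--                 word_lst[i][j]=word_lst[i][j]+" "
--
--     align_lines=[]
--     for l in word_lst:
--         align_lines.append("".join(l))
--     return align_lines
-- ===== SOURCE B (Python) =====
-- def vim_align(shiftwidth, lines):
--     rows = [line.split() for line in lines]
--     outs = [""] * len(rows)
--     j = 0
--     while any(len(r) > j for r in rows):
--         width = max(len(r[j]) for r in rows if len(r) > j) + shiftwidth
--         outs = [o + r[j].ljust(width) if len(r) > j else o
--                 for o, r in zip(outs, rows)]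
--         j += 1
--     return outs
-- ===== Notes on version B (the rewrite author's own statement) =====
-- stated objective: alternative
-- what changed: B builds the output column by column: a while loop over the column index that computes each column's width on the fly and appends the ljust-padded column entry to every row's accumulated output string, instead of A's row-major passes that first fill a mutable width array with nested index loops and then pad every word one space at a time.
import Mathlib
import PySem

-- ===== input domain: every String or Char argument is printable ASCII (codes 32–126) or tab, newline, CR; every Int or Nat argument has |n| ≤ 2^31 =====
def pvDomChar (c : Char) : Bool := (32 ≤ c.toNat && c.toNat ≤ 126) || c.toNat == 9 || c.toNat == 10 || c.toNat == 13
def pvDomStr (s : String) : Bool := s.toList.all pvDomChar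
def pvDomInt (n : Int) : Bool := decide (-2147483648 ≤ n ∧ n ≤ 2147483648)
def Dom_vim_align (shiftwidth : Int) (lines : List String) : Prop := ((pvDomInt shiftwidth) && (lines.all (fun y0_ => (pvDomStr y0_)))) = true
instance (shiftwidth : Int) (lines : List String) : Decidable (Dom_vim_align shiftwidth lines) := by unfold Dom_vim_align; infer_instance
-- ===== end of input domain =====

-- B replaces A's row-major passes (mutable width array, then one-space-at-a-time padding of every
-- word) by a column-major while loop that computes each column's width on the fly and appends the
-- ljust-padded column entry to each row's accumulated output string (objective: alternative).

-- ===== PORT A =====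
-- literal transliteration of A: each Python for-loop is a foldl over the same state,
-- list mutation word_lst[i][j] = … becomes pySetD on the accumulator.
def vim_align (shiftwidth : Int) (lines : List String) : List String :=
  let word_lst : List (List String) :=
    lines.foldl (fun acc i => acc ++ [PySem.Str.split₀ i]) []
  let max_element : Int :=
    word_lst.foldl (fun m i => if PySem.List.len i > m then PySem.List.len i else m) 0
  let max_word : List Int :=
    (PySem.List.pyRange 0 max_element).foldl (fun acc _ => acc ++ [(0 : Int)]) []
  let max_word : List Int :=
    (PySem.List.pyRange 0 (PySem.List.len word_lst)).foldl (fun mw i =>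
      let row := PySem.List.pyGetD word_lst i []
      (PySem.List.pyRange 0 (PySem.List.len row)).foldl (fun mw j =>
        if PySem.Str.len (PySem.List.pyGetD row j "") > PySem.List.pyGetD mw j 0 then
          PySem.List.pySetD mw j (PySem.Str.len (PySem.List.pyGetD row j ""))
        else mw) mw) max_word
  let word_lst : List (List String) :=
    (PySem.List.pyRange 0 (PySem.List.len word_lst)).foldl (fun wl i =>
      (PySem.List.pyRange 0 (PySem.List.len (PySem.List.pyGetD wl i []))).foldl (fun wl j =>
        (PySem.List.pyRange 0 (PySem.List.pyGetD max_word j 0 -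
            PySem.Str.len (PySem.List.pyGetD (PySem.List.pyGetD wl i []) j "") + shiftwidth)).foldl
          (fun wl2 _ =>
            PySem.List.pySetD wl2 i
              (PySem.List.pySetD (PySem.List.pyGetD wl2 i []) j
                (PySem.List.pyGetD (PySem.List.pyGetD wl2 i []) j "" ++ " "))) wl) wl) word_lst
  word_lst.foldl (fun acc l => acc ++ [PySem.Str.join "" l]) []

-- ===== PORT B =====
-- port of str.ljust: pad with spaces to width w, never truncate (exact for any Int w)
def ljustPy (s : String) (w : Int) : String :=
  s ++ String.ofList (List.replicate (w - PySem.Str.len s).toNat ' ')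

-- bound used only for the termination of colLoop (cited in its decreasing_by)
def maxRowLen (rows : List (List String)) : Nat := rows.foldl (fun m r => max m r.length) 0

theorem lt_maxRowLen_of_any (rows : List (List String)) (j : Nat)
    (h : rows.any (fun r => decide (j < r.length)) = true) : j < maxRowLen rows := by
  rcases List.any_eq_true.mp h with ⟨r, hr, hlt⟩
  have hb := (PySem.List.le_foldl_max_nat rows (fun r => r.length) 0).2 r hr
  have := of_decide_eq_true hlt
  unfold maxRowLen
  omega

-- port of Source B's while loop: one iteration per column j; the column width is
-- max(len(r[j]) for r in rows if len(r) > j) (nonempty by the loop guard, so the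
-- foldl max 0 over the same nonneg lengths is exact) plus shiftwidth.
def colLoop (sw : Int) (rows : List (List String)) (j : Nat) (outs : List String) :
    List String :=
  if h : rows.any (fun r => decide (j < r.length)) then
    colLoop sw rows (j + 1)
      ((outs.zip rows).map (fun p =>
        if j < p.2.length then
          p.1 ++ ljustPy (p.2.getD j "")
            (((rows.filter (fun r => decide (j < r.length))).map
              (fun r => PySem.Str.len (r.getD j ""))).foldl max 0 + sw)
        else p.1))
  else outs
termination_by maxRowLen rows - j
decreasing_by have := lt_maxRowLen_of_any rows j h; omega

def vim_align_alt (shiftwidth : Int) (lines : List String) : List String :=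
  let rows : List (List String) := lines.map PySem.Str.split₀
  colLoop shiftwidth rows 0 (List.replicate rows.length "")

-- ===== PRECONDITION & SPEC =====
def Spec_vim_align (shiftwidth : Int) (lines : List String) (out : List String) : Prop := out = vim_align_alt shiftwidth lines
instance (shiftwidth : Int) (lines : List String) (out : List String) : Decidable (Spec_vim_align shiftwidth lines out) := by unfold Spec_vim_align; infer_instance

-- ===== CLAIM (what is proved, stated in full; the proofs are below) =====
def Claim_equal_vim_align : Prop := ∀ (shiftwidth : Int) (lines : List String), Dom_vim_align shiftwidth lines → Spec_vim_align shiftwidth lines (vim_align shiftwidth lines)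

-- ===== LEMMAS AND PROOFS =====

-- pointwise max-merge of width lists (proof-side model of A's width array)
def mergeW : List Int → List Int → List Int
  | [], bs => bs.map (fun b => max 0 b)
  | a :: as, [] => max a 0 :: mergeW as []
  | a :: as, b :: bs => max a b :: mergeW as bs

theorem mergeW_nil_right (a : List Int) (h : ∀ x ∈ a, 0 ≤ x) : mergeW a [] = a := by
  induction a with
  | nil => rfl
  | cons x xs ih =>
    simp only [mergeW, List.cons.injEq]
    exact ⟨by have := h x (by simp); omega, ih (fun y hy => h y (by simp [hy]))⟩

theorem mergeW_length (a b : List Int) : (mergeW a b).length = max a.length b.length := by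
  induction a generalizing b with
  | nil => simp [mergeW]
  | cons x xs ih =>
    cases b with
    | nil =>
      have h := ih []
      simp only [mergeW, List.length_cons]
      simp only [List.length_nil] at h ⊢
      omega
    | cons y ys =>
      have h := ih ys
      simp only [mergeW, List.length_cons]
      omega

theorem mergeW_nonneg (a b : List Int) (ha : ∀ x ∈ a, 0 ≤ x) (hb : ∀ x ∈ b, 0 ≤ x) :
    ∀ x ∈ mergeW a b, 0 ≤ x := by
  induction a generalizing b with
  | nil =>
    intro x hx
    simp only [mergeW, List.mem_map] at hx
    obtain ⟨y, _, rfl⟩ := hx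
    omega
  | cons w ws ih =>
    cases b with
    | nil =>
      simp only [mergeW, List.mem_cons]
      rintro x (rfl | hx)
      · have := ha w (by simp); omega
      · exact ih [] (fun z hz => ha z (by simp [hz])) (by simp) x hx
    | cons y ys =>
      simp only [mergeW, List.mem_cons]
      rintro x (rfl | hx)
      · have := ha w (by simp); omega
      · exact ih ys (fun z hz => ha z (by simp [hz])) (fun z hz => hb z (by simp [hz])) x hx

theorem lens_nonneg (row : List String) : ∀ x ∈ row.map PySem.Str.len, 0 ≤ x := by
  intro x hx
  simp only [List.mem_map] at hx
  obtain ⟨s, _, rfl⟩ := hx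
  simp [PySem.Str.len_eq]

-- A's running max loop over Int equals the Nat running max of the lengths
theorem foldl_max_int_nat (rs : List (List String)) (m : Nat) :
    rs.foldl (fun (m : Int) i => if PySem.List.len i > m then PySem.List.len i else m) (m : Int) =
      ((rs.foldl (fun n r => max n r.length) m : Nat) : Int) := by
  induction rs generalizing m with
  | nil => rfl
  | cons r rs ih =>
    simp only [List.foldl_cons]
    by_cases h : PySem.List.len r > (m : Int)
    · rw [if_pos h, PySem.List.len_eq, ih r.length]
      rw [PySem.List.len_eq] at h
      have hx : r.length = max m r.length := by omega
      conv_lhs => rw [hx]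
    · rw [if_neg h, ih m]
      rw [PySem.List.len_eq] at h
      have hx : m = max m r.length := by omega
      conv_lhs => rw [hx]

theorem widths_length (rs : List (List String)) (ws : List Int) :
    (rs.foldl (fun mw row => mergeW mw (row.map PySem.Str.len)) ws).length =
      rs.foldl (fun n r => max n r.length) ws.length := by
  induction rs generalizing ws with
  | nil => rfl
  | cons r rs ih =>
    simp only [List.foldl_cons]
    rw [ih, mergeW_length]
    simp

-- ---- A's inner width-update loop is mergeW ----

theorem getD_append_length {α : Type} (pre : List α) (y : α) (ys : List α) (d : α) :
    (pre ++ y :: ys).getD pre.length d = y := by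
  simp [List.getD]

theorem set_append_length {α : Type} (pre : List α) (y v : α) (ys : List α) :
    (pre ++ y :: ys).set pre.length v = pre ++ v :: ys := by
  rw [List.set_append_right _ _ (Nat.le_refl _)]
  simp

theorem updRow_eq_mergeW_aux (todo done : List String) (mwpre mwsuf : List Int)
    (hlen : done.length = mwpre.length) (hle : todo.length ≤ mwsuf.length)
    (hnn : ∀ x ∈ mwsuf, 0 ≤ x) :
    (PySem.List.pyRange (done.length : Int) ((done.length : Int) + todo.length)).foldl
      (fun mw j =>
        if PySem.Str.len (PySem.List.pyGetD (done ++ todo) j "") > PySem.List.pyGetD mw j 0 then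
          PySem.List.pySetD mw j (PySem.Str.len (PySem.List.pyGetD (done ++ todo) j ""))
        else mw) (mwpre ++ mwsuf) =
      mwpre ++ mergeW mwsuf (todo.map PySem.Str.len) := by
  induction todo generalizing done mwpre mwsuf with
  | nil =>
    rw [PySem.List.pyRange_one_eq_nil (by simp)]
    simp only [List.foldl_nil, List.map_nil, mergeW_nil_right mwsuf hnn]
  | cons w t ih =>
    cases mwsuf with
    | nil => simp at hle
    | cons y ms =>
      rw [PySem.List.pyRange_one_cons (by push_cast [List.length_cons]; omega), List.foldl_cons]
      have hgrow : PySem.List.pyGetD (done ++ w :: t) (done.length : Int) "" = w := by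
        rw [PySem.List.pyGetD_natCast, getD_append_length]
      have hgmw : PySem.List.pyGetD (mwpre ++ y :: ms) (done.length : Int) 0 = y := by
        rw [hlen, PySem.List.pyGetD_natCast, getD_append_length]
      have hset : PySem.List.pySetD (mwpre ++ y :: ms) (done.length : Int) (PySem.Str.len w) =
          mwpre ++ PySem.Str.len w :: ms := by
        rw [hlen, PySem.List.pySetD_natCast, set_append_length]
      have hstate : (if PySem.Str.len (PySem.List.pyGetD (done ++ w :: t) (done.length : Int) "") >
            PySem.List.pyGetD (mwpre ++ y :: ms) (done.length : Int) 0 then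
          PySem.List.pySetD (mwpre ++ y :: ms) (done.length : Int)
            (PySem.Str.len (PySem.List.pyGetD (done ++ w :: t) (done.length : Int) ""))
        else mwpre ++ y :: ms) = mwpre ++ (max y (PySem.Str.len w)) :: ms := by
        rw [hgrow, hgmw]
        split_ifs with h
        · rw [hset]
          have : max y (PySem.Str.len w) = PySem.Str.len w := by omega
          rw [this]
        · have : max y (PySem.Str.len w) = y := by omega
          rw [this]
      rw [hstate]
      have hrange : PySem.List.pyRange ((done.length : Int) + 1)
          ((done.length : Int) + (w :: t).length) =
          PySem.List.pyRange ((done ++ [w]).length : Int)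
            (((done ++ [w]).length : Int) + t.length) := by
        congr 1
        · simp
        · simp
          omega
      have hfun : (done ++ w :: t) = ((done ++ [w]) ++ t) := by simp
      rw [hrange, hfun,
        show mwpre ++ max y (PySem.Str.len w) :: ms =
          (mwpre ++ [max y (PySem.Str.len w)]) ++ ms by simp]
      rw [ih (done ++ [w]) (mwpre ++ [max y (PySem.Str.len w)]) ms
        (by simp [hlen]) (by simpa using hle) (fun x hx => hnn x (by simp [hx]))]
      simp [mergeW]

theorem updRow_eq_mergeW (row : List String) (mw : List Int)
    (hle : row.length ≤ mw.length) (hnn : ∀ x ∈ mw, 0 ≤ x) :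
    (PySem.List.pyRange 0 (PySem.List.len row)).foldl
      (fun mw j =>
        if PySem.Str.len (PySem.List.pyGetD row j "") > PySem.List.pyGetD mw j 0 then
          PySem.List.pySetD mw j (PySem.Str.len (PySem.List.pyGetD row j ""))
        else mw) mw =
      mergeW mw (row.map PySem.Str.len) := by
  have h := updRow_eq_mergeW_aux row [] [] mw rfl (by simpa using hle) hnn
  simpa [PySem.List.len] using h

-- ---- A's character-append padding loops ----

def spaces (n : Nat) : String := String.ofList (List.replicate n ' ')

-- the words of row padded by A's formula, positions counted from k
def padFrom (mw : List Int) (sw : Int) : Nat → List String → List String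
  | _, [] => []
  | k, w :: t =>
    (w ++ spaces (PySem.List.pyGetD mw (k : Int) 0 - PySem.Str.len w + sw).toNat) ::
      padFrom mw sw (k + 1) t

theorem append_spaces (w : String) (k : Nat) :
    (w ++ " ") ++ spaces k = w ++ spaces (k + 1) := by
  apply String.toList_inj.mp
  simp [spaces, List.replicate_succ]

theorem append_spaces_zero (w : String) : w ++ spaces 0 = w := by
  apply String.toList_inj.mp
  simp [spaces]

theorem kloop (l : List Int) (wl : List (List String)) (i j : Nat) (row : List String)
    (w : String) (hi : i < wl.length) (hrow : wl[i]? = some row) (hj : j < row.length)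
    (hw : row[j]? = some w) :
    l.foldl (fun wl2 _ =>
        PySem.List.pySetD wl2 (i : Int)
          (PySem.List.pySetD (PySem.List.pyGetD wl2 (i : Int) []) (j : Int)
            (PySem.List.pyGetD (PySem.List.pyGetD wl2 (i : Int) []) (j : Int) "" ++ " "))) wl =
      wl.set i (row.set j (w ++ spaces l.length)) := by
  induction l generalizing wl row w with
  | nil =>
    rw [List.foldl_nil, List.length_nil, append_spaces_zero]
    have : row.set j w = row := by
      have hj' : row[j] = w := by
        have := hw; rw [List.getElem?_eq_getElem hj] at this; exact (Option.some_inj.mp this)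
      rw [← hj']; exact List.set_getElem_self hj
    rw [this]
    have hi' : wl[i] = row := by
      have := hrow; rw [List.getElem?_eq_getElem hi] at this; exact (Option.some_inj.mp this)
    rw [← hi']; exact (List.set_getElem_self hi).symm
  | cons x ls ih =>
    rw [List.foldl_cons]
    have hg1 : PySem.List.pyGetD wl (i : Int) [] = row := by
      rw [PySem.List.pyGetD_natCast, List.getD_eq_getElem?_getD, hrow]; rfl
    have hg2 : PySem.List.pyGetD row (j : Int) "" = w := by
      rw [PySem.List.pyGetD_natCast, List.getD_eq_getElem?_getD, hw]; rfl
    rw [hg1, hg2, PySem.List.pySetD_natCast, PySem.List.pySetD_natCast]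
    rw [ih (wl.set i (row.set j (w ++ " "))) (row.set j (w ++ " ")) (w ++ " ")
      (by simpa using hi)
      (by rw [List.getElem?_set_self]; · simp [hi]
          )
      (by simpa using hj)
      (by rw [List.getElem?_set_self]; · simp [hj]
          )]
    rw [List.set_set, List.set_set, append_spaces]
    rfl

theorem jloop (mw : List Int) (sw : Int) (todo : List String) :
    ∀ (pref : List String) (wl : List (List String)) (i : Nat), i < wl.length →
    wl[i]? = some (pref ++ todo) →
    (PySem.List.pyRange (pref.length : Int) ((pref.length : Int) + todo.length)).foldl
      (fun wl j =>
        (PySem.List.pyRange 0 (PySem.List.pyGetD mw j 0 -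
            PySem.Str.len (PySem.List.pyGetD (PySem.List.pyGetD wl (i : Int) []) j "") + sw)).foldl
          (fun wl2 _ =>
            PySem.List.pySetD wl2 (i : Int)
              (PySem.List.pySetD (PySem.List.pyGetD wl2 (i : Int) []) j
                (PySem.List.pyGetD (PySem.List.pyGetD wl2 (i : Int) []) j "" ++ " "))) wl) wl =
      wl.set i (pref ++ padFrom mw sw pref.length todo) := by
  induction todo with
  | nil =>
    intro pref wl i hi hrow
    rw [PySem.List.pyRange_one_eq_nil (by simp), List.foldl_nil, padFrom, List.append_nil]
    have hi' : wl[i] = pref := by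
      have := hrow; rw [List.getElem?_eq_getElem hi] at this; simpa using this
    rw [← hi']; exact (List.set_getElem_self hi).symm
  | cons w t ih =>
    intro pref wl i hi hrow
    rw [PySem.List.pyRange_one_cons (by push_cast [List.length_cons]; omega), List.foldl_cons]
    have hg1 : PySem.List.pyGetD wl (i : Int) [] = pref ++ w :: t := by
      rw [PySem.List.pyGetD_natCast, List.getD_eq_getElem?_getD, hrow]; rfl
    have hg2 : PySem.List.pyGetD (pref ++ w :: t) (pref.length : Int) "" = w := by
      rw [PySem.List.pyGetD_natCast, getD_append_length]
    have hc := kloop (PySem.List.pyRange 0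
        (PySem.List.pyGetD mw (pref.length : Int) 0 - PySem.Str.len w + sw))
      wl i pref.length (pref ++ w :: t) w hi hrow
      (by simp) (by rw [List.getElem?_append_right (Nat.le_refl _)]; simp)
    rw [hg1, hg2, hc]
    have hsetrow : (pref ++ w :: t).set pref.length
        (w ++ spaces (PySem.List.pyRange 0
          (PySem.List.pyGetD mw (pref.length : Int) 0 - PySem.Str.len w + sw)).length) =
        pref ++ (w ++ spaces (PySem.List.pyGetD mw (pref.length : Int) 0 -
          PySem.Str.len w + sw).toNat) :: t := by
      rw [set_append_length]
      congr 3
      rw [PySem.List.length_pyRange_one]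
      congr 1
      omega
    rw [hsetrow]
    have hrange : PySem.List.pyRange ((pref.length : Int) + 1)
        ((pref.length : Int) + (w :: t).length) =
        PySem.List.pyRange (((pref ++ [w ++ spaces (PySem.List.pyGetD mw (pref.length : Int) 0 -
            PySem.Str.len w + sw).toNat]).length : Int))
          (((pref ++ [w ++ spaces (PySem.List.pyGetD mw (pref.length : Int) 0 -
            PySem.Str.len w + sw).toNat]).length : Int) + t.length) := by
      congr 1 <;> push_cast [List.length_cons, List.length_append, List.length_nil] <;> omega
    rw [hrange]
    have hstate : pref ++ (w ++ spaces (PySem.List.pyGetD mw (pref.length : Int) 0 -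
          PySem.Str.len w + sw).toNat) :: t =
        (pref ++ [w ++ spaces (PySem.List.pyGetD mw (pref.length : Int) 0 -
          PySem.Str.len w + sw).toNat]) ++ t := by simp
    rw [show wl.set i (pref ++ (w ++ spaces (PySem.List.pyGetD mw (pref.length : Int) 0 -
        PySem.Str.len w + sw).toNat) :: t) =
      wl.set i ((pref ++ [w ++ spaces (PySem.List.pyGetD mw (pref.length : Int) 0 -
        PySem.Str.len w + sw).toNat]) ++ t) from by rw [← hstate]]
    rw [ih (pref ++ [w ++ spaces (PySem.List.pyGetD mw (pref.length : Int) 0 -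
        PySem.Str.len w + sw).toNat]) _ i (by simpa using hi)
      (by rw [List.getElem?_set_self] ; simp [hi])]
    rw [List.set_set]
    simp only [padFrom, List.length_append, List.length_cons, List.length_nil]
    simp

theorem iloop (mw : List Int) (sw : Int) (todo : List (List String)) :
    ∀ (done : List (List String)),
    (PySem.List.pyRange (done.length : Int) ((done.length : Int) + todo.length)).foldl
      (fun wl i =>
        (PySem.List.pyRange 0 (PySem.List.len (PySem.List.pyGetD wl i []))).foldl
          (fun wl j =>
            (PySem.List.pyRange 0 (PySem.List.pyGetD mw j 0 -
                PySem.Str.len (PySem.List.pyGetD (PySem.List.pyGetD wl i []) j "") + sw)).foldl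
              (fun wl2 _ =>
                PySem.List.pySetD wl2 i
                  (PySem.List.pySetD (PySem.List.pyGetD wl2 i []) j
                    (PySem.List.pyGetD (PySem.List.pyGetD wl2 i []) j "" ++ " "))) wl) wl)
      (done ++ todo) =
      done ++ todo.map (fun row => padFrom mw sw 0 row) := by
  induction todo with
  | nil =>
    intro done
    rw [PySem.List.pyRange_one_eq_nil (by simp)]
    simp
  | cons row t ih =>
    intro done
    rw [PySem.List.pyRange_one_cons (by push_cast [List.length_cons]; omega), List.foldl_cons]
    have hi : done.length < (done ++ row :: t).length := by simp
    have hg : PySem.List.pyGetD (done ++ row :: t) (done.length : Int) [] = row := by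
      rw [PySem.List.pyGetD_natCast, getD_append_length]
    rw [hg, PySem.List.len_eq]
    have hj := jloop mw sw row [] (done ++ row :: t) done.length hi (by simp)
    simp only [List.length_nil, Nat.cast_zero, List.nil_append, zero_add] at hj
    rw [hj]
    have hset : (done ++ row :: t).set done.length (padFrom mw sw 0 row) =
        (done ++ [padFrom mw sw 0 row]) ++ t := by
      rw [set_append_length]; simp
    rw [hset]
    have hrange : PySem.List.pyRange ((done.length : Int) + 1)
        ((done.length : Int) + (row :: t).length) =
        PySem.List.pyRange (((done ++ [padFrom mw sw 0 row]).length : Int))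
          (((done ++ [padFrom mw sw 0 row]).length : Int) + t.length) := by
      congr 1 <;> push_cast [List.length_cons, List.length_append, List.length_nil] <;> omega
    rw [hrange, ih (done ++ [padFrom mw sw 0 row])]
    simp

-- A's width-update fold equals the mergeW fold, given the invariant
theorem foldA_widths (rs : List (List String)) (ws : List Int)
    (h1 : ∀ r ∈ rs, r.length ≤ ws.length) (h2 : ∀ x ∈ ws, 0 ≤ x) :
    rs.foldl (fun mw row =>
        (PySem.List.pyRange 0 (PySem.List.len row)).foldl
          (fun mw j =>
            if PySem.Str.len (PySem.List.pyGetD row j "") > PySem.List.pyGetD mw j 0 then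
              PySem.List.pySetD mw j (PySem.Str.len (PySem.List.pyGetD row j ""))
            else mw) mw) ws =
      rs.foldl (fun mw row => mergeW mw (row.map PySem.Str.len)) ws := by
  induction rs generalizing ws with
  | nil => rfl
  | cons r rs ih =>
    simp only [List.foldl_cons]
    rw [updRow_eq_mergeW r ws (h1 r (by simp)) h2]
    exact ih (mergeW ws (r.map PySem.Str.len))
      (fun t ht => by
        have := h1 t (by simp [ht])
        rw [mergeW_length]
        omega)
      (mergeW_nonneg _ _ h2 (lens_nonneg r))

-- ---- B-side: the column loop computes the same padded rows ----

theorem mergeW_getD (a b : List Int) (j : Nat) :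
    (mergeW a b).getD j 0 = max (a.getD j 0) (b.getD j 0) := by
  induction a generalizing b j with
  | nil =>
    induction b generalizing j with
    | nil => simp [mergeW]
    | cons y ys ihb =>
      cases j with
      | zero => simp [mergeW]
      | succ j => simpa [mergeW] using ihb j
  | cons x xs ih =>
    cases b with
    | nil =>
      cases j with
      | zero => simp [mergeW]
      | succ j => simpa [mergeW] using ih [] j
    | cons y ys =>
      cases j with
      | zero => simp [mergeW]
      | succ j => simpa [mergeW] using ih ys j

theorem widths_getD (rs : List (List String)) (z : List Int) (j : Nat) :
    (rs.foldl (fun mw row => mergeW mw (row.map PySem.Str.len)) z).getD j 0 =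
      rs.foldl (fun m r => max m ((r.map PySem.Str.len).getD j 0)) (z.getD j 0) := by
  induction rs generalizing z with
  | nil => rfl
  | cons r rs ih =>
    simp only [List.foldl_cons]
    rw [ih, mergeW_getD]

theorem colWidth_eq_foldl (rs : List (List String)) (j : Nat) :
    ∀ (m : Int), 0 ≤ m →
    ((rs.filter (fun r => decide (j < r.length))).map
        (fun r => PySem.Str.len (r.getD j ""))).foldl max m =
      rs.foldl (fun m r => max m ((r.map PySem.Str.len).getD j 0)) m := by
  induction rs with
  | nil => intro m _; rfl
  | cons r rs ih =>
    intro m hm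
    by_cases h : j < r.length
    · rw [List.filter_cons_of_pos (by simpa using h), List.map_cons, List.foldl_cons,
        List.foldl_cons]
      have hg : (r.map PySem.Str.len).getD j 0 = PySem.Str.len (r.getD j "") := by
        rw [List.getD_eq_getElem?_getD, List.getElem?_map, List.getElem?_eq_getElem h,
          List.getD_eq_getElem?_getD, List.getElem?_eq_getElem h]
        rfl
      rw [hg]
      exact ih _ (by have := PySem.Str.len_eq (r.getD j ""); omega)
    · rw [List.filter_cons_of_neg (by simpa using h), List.foldl_cons]
      have hg : (r.map PySem.Str.len).getD j 0 = 0 := by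
        rw [List.getD_eq_getElem?_getD, List.getElem?_map,
          List.getElem?_eq_none (by simpa using Nat.le_of_not_lt h)]
        rfl
      rw [hg, max_eq_left hm]
      exact ih m hm

-- join with empty separator concatenates
theorem intercalate_nil_sep {a : Type} (l : List (List a)) :
    List.intercalate ([] : List a) l = l.flatten := by
  induction l with
  | nil => rfl
  | cons x t ih =>
    cases t with
    | nil => simp [List.intercalate]
    | cons y u =>
      simp only [List.intercalate, List.intersperse] at ih ⊢
      simp_all

theorem join_nil_str : PySem.Str.join "" [] = "" := by
  simp [PySem.Str.join, PySem.Chars.join, List.intercalate]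

theorem join_append_str (xs : List String) (y : String) :
    PySem.Str.join "" (xs ++ [y]) = PySem.Str.join "" xs ++ y := by
  apply String.toList_inj.mp
  simp only [PySem.Str.join, PySem.Chars.join]
  simp [intercalate_nil_sep]

theorem padFrom_snoc (mw : List Int) (sw : Int) (xs : List String) (y : String) :
    ∀ (k : Nat), padFrom mw sw k (xs ++ [y]) =
      padFrom mw sw k xs ++
        [y ++ spaces (PySem.List.pyGetD mw ((k + xs.length : Nat) : Int) 0 -
          PySem.Str.len y + sw).toNat] := by
  induction xs with
  | nil => intro k; simp [padFrom]
  | cons x t ih =>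
    intro k
    simp only [List.cons_append, padFrom, List.cons.injEq, true_and]
    rw [ih (k + 1)]
    have hk : k + 1 + t.length = k + (x :: t).length := by simp; omega
    rw [hk]

theorem ljustPy_eq_pad (w : String) (v sw : Int) :
    ljustPy w (v + sw) = w ++ spaces (v - PySem.Str.len w + sw).toNat := by
  unfold ljustPy spaces
  have h : v + sw - PySem.Str.len w = v - PySem.Str.len w + sw := by omega
  rw [h]

theorem colLoop_inv (sw : Int) (rows : List (List String)) (ws : List Int)
    (hws : ws = rows.foldl (fun mw row => mergeW mw (row.map PySem.Str.len)) []) :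
    ∀ (n j : Nat), maxRowLen rows ≤ j + n →
    colLoop sw rows j (rows.map (fun r => PySem.Str.join "" (padFrom ws sw 0 (r.take j)))) =
      rows.map (fun r => PySem.Str.join "" (padFrom ws sw 0 r)) := by
  have hbound : ∀ r ∈ rows, r.length ≤ maxRowLen rows := fun r hr =>
    (PySem.List.le_foldl_max_nat rows (fun r => r.length) 0).2 r hr
  intro n
  induction n with
  | zero =>
    intro j hj
    have hnone : rows.any (fun r => decide (j < r.length)) = false := by
      rw [List.any_eq_false]
      intro r hr
      have := hbound r hr
      simp only [decide_eq_true_eq]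
      omega
    rw [colLoop, dif_neg (by simp [hnone])]
    apply List.map_congr_left
    intro r hr
    rw [List.take_of_length_le (by have := hbound r hr; omega)]
  | succ n ih =>
    intro j hj
    by_cases h : rows.any (fun r => decide (j < r.length)) = true
    · rw [colLoop, dif_pos h]
      have hzipgen : ∀ (l : List (List String)) (f : List String → String),
          (l.map f).zip l = l.map (fun r => (f r, r)) := by
        intro l f
        induction l with
        | nil => rfl
        | cons a t iht => simp [iht]
      have hzip : ((rows.map (fun r => PySem.Str.join "" (padFrom ws sw 0 (r.take j)))).zip rows)
          = rows.map (fun r => (PySem.Str.join "" (padFrom ws sw 0 (r.take j)), r)) :=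
        hzipgen rows _
      rw [hzip, List.map_map]
      have hstep : (rows.map ((fun p : String × List String =>
            if j < p.2.length then p.1 ++ ljustPy (p.2.getD j "")
              (((rows.filter (fun r => decide (j < r.length))).map
                (fun r => PySem.Str.len (r.getD j ""))).foldl max 0 + sw) else p.1) ∘
            (fun r => (PySem.Str.join "" (padFrom ws sw 0 (r.take j)), r)))) =
          rows.map (fun r => PySem.Str.join "" (padFrom ws sw 0 (r.take (j + 1)))) := by
        apply List.map_congr_left
        intro r hr
        simp only [Function.comp]
        by_cases hjr : j < r.length
        · rw [if_pos hjr]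
          have htake : r.take (j + 1) = r.take j ++ [r[j]] := by
            rw [List.take_add_one, List.getElem?_eq_getElem hjr]
            rfl
          rw [htake, padFrom_snoc, join_append_str]
          congr 1
          have hlen : (r.take j).length = j := List.length_take_of_le (by omega)
          rw [hlen]
          have hcw : ((rows.filter (fun r => decide (j < r.length))).map
              (fun r => PySem.Str.len (r.getD j ""))).foldl max 0 =
              PySem.List.pyGetD ws ((0 + j : Nat) : Int) 0 := by
            rw [colWidth_eq_foldl rows j 0 le_rfl]
            simp only [Nat.zero_add]
            rw [PySem.List.pyGetD_natCast, hws, widths_getD]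
            rfl
          have hgd : r.getD j "" = r[j] := by
            rw [List.getD_eq_getElem?_getD, List.getElem?_eq_getElem hjr]
            rfl
          rw [hcw, hgd, ljustPy_eq_pad]
        · rw [if_neg hjr]
          rw [List.take_of_length_le (by omega), List.take_of_length_le (by omega)]
      rw [hstep]
      exact ih (j + 1) (by omega)
    · rw [colLoop, dif_neg h]
      have hnone : ∀ r ∈ rows, r.length ≤ j := by simpa using h
      apply List.map_congr_left
      intro r hr
      rw [List.take_of_length_le (hnone r hr)]

theorem foldl_max_of_le (rs : List (List String)) :
    ∀ m : Nat, (∀ r ∈ rs, r.length ≤ m) → rs.foldl (fun n r => max n r.length) m = m := by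
  induction rs with
  | nil => intro m _; rfl
  | cons r t ih =>
    intro m hm
    simp only [List.foldl_cons]
    rw [max_eq_left (hm r (by simp))]
    exact ih m (fun x hx => hm x (by simp [hx]))

-- ===== VERDICT (by name: the statement is the Claim_ definition above) =====
theorem vim_align_spec : Claim_equal_vim_align := by
  intro sw lines _
  unfold Spec_vim_align
  simp only [vim_align, vim_align_alt]
  rw [PySem.List.foldl_append_singleton_eq_map PySem.Str.split₀ lines]
  simp only [List.nil_append]
  have hmax := foldl_max_int_nat (lines.map PySem.Str.split₀) 0
  push_cast at hmax
  rw [hmax]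
  rw [PySem.List.foldl_append_singleton_eq_map (fun _ => (0 : Int))]
  simp only [List.nil_append, List.map_const', PySem.List.length_pyRange_one, Int.sub_zero,
    Int.toNat_natCast]
  rw [PySem.List.foldl_pyRange_zero_pyGetD (lines.map PySem.Str.split₀) []
    (fun mw row =>
      (PySem.List.pyRange 0 (PySem.List.len row)).foldl
        (fun mw j =>
          if PySem.Str.len (PySem.List.pyGetD row j "") > PySem.List.pyGetD mw j 0 then
            PySem.List.pySetD mw j (PySem.Str.len (PySem.List.pyGetD row j ""))
          else mw) mw)]
  have hbound := (PySem.List.le_foldl_max_nat (lines.map PySem.Str.split₀)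
    (fun r => r.length) 0).2
  rw [foldA_widths _ _ (fun r hr => by simpa using hbound r hr) (by simp)]
  set rows := lines.map PySem.Str.split₀ with hrows
  set ws := rows.foldl (fun mw row => mergeW mw (row.map PySem.Str.len)) [] with hws
  have hWlen : ws.length = List.foldl (fun n r => max n r.length) 0 rows := by
    simpa using widths_length rows []
  have hrepl : List.replicate (List.foldl (fun n r => max n r.length) 0 rows) (0 : Int) =
      List.replicate ws.length (0 : Int) := by rw [hWlen]
  -- A's padded-width fold starts from the replicate-zero list merged with ws
  have hmerge0 : rows.foldl (fun mw row => mergeW mw (row.map PySem.Str.len))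
      (List.replicate (List.foldl (fun n r => max n r.length) 0 rows) (0 : Int)) = ws := by
    rw [hrepl]
    have hz : ∀ j : Nat, (List.replicate ws.length (0 : Int)).getD j 0 = (0 : Int) := by
      intro j
      rw [List.getD_eq_getElem?_getD]
      rcases Nat.lt_or_ge j ws.length with hj | hj
      · simp [hj]
      · rw [List.getElem?_eq_none (by simpa using hj)]
        rfl
    -- pointwise equal and same length
    apply List.ext_getElem
    · rw [widths_length, widths_length]
      simp only [List.length_replicate, List.length_nil]
      exact foldl_max_of_le rows _ hbound
    · intro i h1 h2
      have e1 : (rows.foldl (fun mw row => mergeW mw (row.map PySem.Str.len))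
          (List.replicate ws.length (0 : Int))).getD i 0 =
          rows.foldl (fun m r => max m ((r.map PySem.Str.len).getD i 0)) 0 := by
        rw [widths_getD, hz]
      have e2 : ws.getD i 0 = rows.foldl (fun m r => max m ((r.map PySem.Str.len).getD i 0)) 0 := by
        rw [hws, widths_getD]; rfl
      have := e1.trans e2.symm
      rwa [List.getD_eq_getElem?_getD, List.getD_eq_getElem?_getD,
        List.getElem?_eq_getElem h1, List.getElem?_eq_getElem h2,
        Option.getD_some, Option.getD_some] at this
  rw [hmerge0]
  rw [PySem.List.len_eq rows]
  have hi := iloop ws sw rows []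
  simp only [List.length_nil, Nat.cast_zero, zero_add, List.nil_append] at hi
  rw [hi]
  rw [PySem.List.foldl_append_singleton_eq_map]
  simp only [List.nil_append, List.map_map]
  -- B's side: the column loop from an all-empty accumulator
  have hinit : List.replicate rows.length "" =
      rows.map (fun r => PySem.Str.join "" (padFrom ws sw 0 (r.take 0))) := by
    have : ∀ r : List String, PySem.Str.join "" (padFrom ws sw 0 (r.take 0)) = "" := by
      intro r; simp [padFrom, join_nil_str]
    rw [List.map_congr_left (fun r _ => this r), List.map_const']
  rw [hinit, colLoop_inv sw rows ws hws (maxRowLen rows) 0 (by omega)]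
  rfl
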